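-- pv_equiv track=rewrite | github.com/ViktoriaYu/Ciphers | Playfair.py | prepare_msg
-- ===== SOURCE A (Python) =====
-- def prepare_msg(msg):
--     msg = msg.replace(" ", "").upper().replace("J", "I")
--     i = 0
--     while i < len(msg) - 1:
--         if msg[i] == msg[i + 1]:
--             msg = msg[:i + 1] + 'X' + msg[i + 1:]
--         i += 2
--     if len(msg) % 2 != 0:
--         msg += 'X'
--     return msg
-- ===== SOURCE B (Python) =====
-- def prepare_msg(msg):
--     cleaned = msg.replace(" ", "").upper().replace("J", "I")
--     out = []
--     for c in cleaned:
--         if len(out) % 2 == 1 and out[-1] == c: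
--             out.append('X')
--         out.append(c)
--     if len(out) % 2 == 1:
--         out.append('X')
--     return "".join(out)
-- ===== Notes on version B (the rewrite author's own statement) =====
-- stated objective: faster
-- what changed: Replaced A's index-stepping while loop that rebuilds the whole string by slicing on every duplicate insertion with a single left-to-right pass appending characters to a list, inserting the padding letter when the second character of the current pair repeats the first.
import Mathlib
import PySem

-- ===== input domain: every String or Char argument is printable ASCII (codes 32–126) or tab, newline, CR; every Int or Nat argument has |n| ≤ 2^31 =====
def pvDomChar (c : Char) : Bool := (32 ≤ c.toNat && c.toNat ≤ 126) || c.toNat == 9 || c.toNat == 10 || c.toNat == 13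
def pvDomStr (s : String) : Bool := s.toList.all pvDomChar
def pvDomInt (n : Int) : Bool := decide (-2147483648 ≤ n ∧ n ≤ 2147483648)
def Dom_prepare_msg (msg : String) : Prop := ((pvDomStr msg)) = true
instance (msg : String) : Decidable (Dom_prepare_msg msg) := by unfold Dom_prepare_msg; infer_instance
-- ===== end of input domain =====

-- B replaces A's quadratic slice-and-reinsert while loop by one linear append-only pass (objective: faster, asymptotic).

-- ===== PORT A =====
-- A's while loop: i steps by 2 over the (growing) string; 'i < len(msg) - 1' over ℤ
-- is exactly 'i + 1 < msg.length' for a Nat index i.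
def pvLoopA (s : List Char) (i : Nat) : List Char :=
  if h : i + 1 < s.length then
    if s[i]? = s[i+1]? then
      -- msg = msg[:i+1] + 'X' + msg[i+1:]
      pvLoopA (s.take (i+1) ++ 'X' :: s.drop (i+1)) (i+2)
    else
      pvLoopA s (i+2)
  else s
termination_by s.length - i
decreasing_by
  · simp; omega
  · omega

def prepare_msg (msg : String) : String :=
  let m := PySem.Str.replace (PySem.Str.upper (PySem.Str.replace msg " " "")) "J" "I"
  let m2 := pvLoopA m.toList 0
  let m3 := if m2.length % 2 ≠ 0 then m2 ++ ['X'] else m2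
  String.ofList m3

-- ===== PORT B =====
-- one step of B's for-loop: out[-1] on a nonempty list is List.getLast?
def pvStepB (acc : List Char) (c : Char) : List Char :=
  let acc := if acc.length % 2 == 1 && acc.getLast? == some c then acc ++ ['X'] else acc
  acc ++ [c]

def prepare_msg_alt (msg : String) : String :=
  let cleaned := PySem.Str.replace (PySem.Str.upper (PySem.Str.replace msg " " "")) "J" "I"
  let out := cleaned.toList.foldl pvStepB []
  let out := if out.length % 2 == 1 then out ++ ['X'] else out
  String.ofList out

-- ===== PRECONDITION & SPEC =====
def Spec_prepare_msg (msg : String) (out : String) : Prop := out = prepare_msg_alt msg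
instance (msg : String) (out : String) : Decidable (Spec_prepare_msg msg out) := by unfold Spec_prepare_msg; infer_instance

-- ===== CLAIM (what is proved, stated in full; the proofs are below) =====
def Claim_equal_prepare_msg : Prop := ∀ (msg : String), Dom_prepare_msg msg → Spec_prepare_msg msg (prepare_msg msg)

-- ===== LEMMAS AND PROOFS =====

-- the common pair-splitting function both loops compute
def pvPairUp : List Char → List Char
  | [] => []
  | [a] => [a]
  | a :: b :: t => if a = b then a :: 'X' :: pvPairUp (b :: t) else a :: b :: pvPairUp t

theorem pvLoopA_eq_pairUp (n : Nat) (s p : List Char) (hn : s.length ≤ n) :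
    pvLoopA (p ++ s) p.length = p ++ pvPairUp s := by
  induction n generalizing s p with
  | zero =>
    have : s = [] := List.eq_nil_of_length_eq_zero (Nat.le_zero.mp hn)
    subst this
    rw [pvLoopA]; simp [pvPairUp]
  | succ n ih =>
    match s with
    | [] => rw [pvLoopA]; simp [pvPairUp]
    | [a] => rw [pvLoopA]; simp [pvPairUp]
    | a :: b :: t =>
      rw [pvLoopA]
      have hlt : p.length + 1 < (p ++ a :: b :: t).length := by simp
      rw [dif_pos hlt]
      have hga : (p ++ a :: b :: t)[p.length]? = some a := by
        simp
      have hgb : (p ++ a :: b :: t)[p.length + 1]? = some b := by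
        simp
      rw [hga, hgb]
      by_cases hab : a = b
      · subst hab
        rw [if_pos rfl]
        have htk : (p ++ a :: a :: t).take (p.length + 1) = p ++ [a] := by
          simp [List.take_append]
        have hdr : (p ++ a :: a :: t).drop (p.length + 1) = a :: t := by
          simp [List.drop_append]
        rw [htk, hdr,
          show p ++ [a] ++ 'X' :: a :: t = (p ++ [a, 'X']) ++ (a :: t) by simp,
          show p.length + 2 = (p ++ [a, 'X']).length by simp,
          ih (a :: t) (p ++ [a, 'X']) (by simp at hn ⊢; omega)]
        simp [pvPairUp]
      · rw [if_neg (by simp [hab]),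
          show p ++ a :: b :: t = (p ++ [a, b]) ++ t by simp,
          show p.length + 2 = (p ++ [a, b]).length by simp,
          ih t (p ++ [a, b]) (by simp at hn ⊢; omega)]
        simp [pvPairUp, hab]

theorem pvFoldB_eq_pairUp (n : Nat) (t : List Char) (ht : t.length ≤ n)
    (acc : List Char) (b : Char) (hacc : acc.length % 2 = 0) :
    List.foldl pvStepB (acc ++ [b]) t = acc ++ pvPairUp (b :: t) := by
  induction n generalizing t acc b with
  | zero =>
    have : t = [] := List.eq_nil_of_length_eq_zero (Nat.le_zero.mp ht)
    subst this
    simp [pvPairUp]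
  | succ n ih =>
    rcases t with _ | ⟨c, t'⟩
    · simp [pvPairUp]
    · rw [List.foldl_cons]
      have h1 : (acc.length + 1) % 2 = 1 := by omega
      by_cases hbc : b = c
      · have hstep : pvStepB (acc ++ [b]) c = (acc ++ [b, 'X']) ++ [c] := by
          simp [pvStepB, h1, hbc]
        rw [hstep, ih t' (by simp at ht ⊢; omega) (acc ++ [b, 'X']) c (by simp; omega)]
        simp [pvPairUp, hbc]
      · have hstep : pvStepB (acc ++ [b]) c = acc ++ [b, c] := by
          simp [pvStepB, h1, hbc]
        rw [hstep]
        rcases t' with _ | ⟨d, t''⟩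
        · simp [pvPairUp, hbc]
        · rw [List.foldl_cons]
          have hstep2 : pvStepB (acc ++ [b, c]) d = (acc ++ [b, c]) ++ [d] := by
            have h2 : ¬ acc.length % 2 = 1 := by omega
            simp [pvStepB, h2]
          rw [hstep2, ih t'' (by simp only [List.length_cons] at ht ⊢; omega) (acc ++ [b, c]) d (by simp; omega)]
          simp [pvPairUp, hbc]

theorem pvFold_eq_pairUp (s : List Char) : List.foldl pvStepB [] s = pvPairUp s := by
  rcases s with _ | ⟨b, t⟩
  · simp [pvPairUp]
  · rw [List.foldl_cons, show pvStepB [] b = [] ++ [b] by simp [pvStepB],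
      pvFoldB_eq_pairUp t.length t (Nat.le_refl _) [] b (by simp)]
    simp

-- ===== VERDICT (by name: the statement is the Claim_ definition above) =====
theorem prepare_msg_spec : Claim_equal_prepare_msg := by
  intro msg _
  unfold Spec_prepare_msg prepare_msg prepare_msg_alt
  have hA := pvLoopA_eq_pairUp
      ((PySem.Str.replace (PySem.Str.upper (PySem.Str.replace msg " " "")) "J" "I").toList.length)
      ((PySem.Str.replace (PySem.Str.upper (PySem.Str.replace msg " " "")) "J" "I").toList) []
      (Nat.le_refl _)
  simp only [List.nil_append, List.length_nil] at hA
  simp only [hA, pvFold_eq_pairUp]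
  simp
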